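-- pv_equiv track=rewrite | github.com/ZhengLiangliang1996/Speech-Recogniton-Tool-Box | utils/cha_level_helper.py | output_sequence
-- ===== SOURCE A (Python) =====
-- def output_sequence(y_cha):
--     """
--     first sequence with batch
--     """
--     sequence = []
--     start = 0
--     sequence.append([])
--
--     for i in range(len(y_cha[0])):
--         if y_cha[0][i][0] == start:
--             sequence[start].append(y_cha[1][i])
--         else:
--             start += 1
--             sequence.append([])
--
--
--     # only print first suquence of batch
--     index = sequence[0]
--     seq = []
--     for idx in index:
--         if idx == 0:
--             seq.append(' ')
--         elif idx == 27:
--             seq.append("'")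
--         elif idx == 28:
--             continue
--         else:
--             seq.append(chr(idx+96))
--
--     seq = ''.join(seq)
--     return seq
-- ===== SOURCE B (Python) =====
-- def output_sequence(y_cha):
--     """
--     first sequence with batch
--     """
--     # One fused pass: collect characters for batch-0 prefix, stop at first non-zero batch index.
--     chars = []
--     for b, v in zip(y_cha[0], y_cha[1]):
--         if b[0] != 0:
--             break
--         if v == 0:
--             chars.append(' ')
--         elif v == 27:
--             chars.append("'")
--         elif v != 28:
--             chars.append(chr(v + 96))
--     return ''.join(chars)
-- ===== Notes on version B (the rewrite author's own statement) =====
-- stated objective: simpler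
-- what changed: B replaces A's two passes (index loop grouping codes by batch index into a list of lists, then a mapping loop over the first group) with one fused early-stopping pass over zip(y_cha[0], y_cha[1]) that collects characters only while the batch index is 0.
-- outside the precondition, e.g. on output_sequence(([[1], [2]], [])): A returns '', B returns ''
import Mathlib
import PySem

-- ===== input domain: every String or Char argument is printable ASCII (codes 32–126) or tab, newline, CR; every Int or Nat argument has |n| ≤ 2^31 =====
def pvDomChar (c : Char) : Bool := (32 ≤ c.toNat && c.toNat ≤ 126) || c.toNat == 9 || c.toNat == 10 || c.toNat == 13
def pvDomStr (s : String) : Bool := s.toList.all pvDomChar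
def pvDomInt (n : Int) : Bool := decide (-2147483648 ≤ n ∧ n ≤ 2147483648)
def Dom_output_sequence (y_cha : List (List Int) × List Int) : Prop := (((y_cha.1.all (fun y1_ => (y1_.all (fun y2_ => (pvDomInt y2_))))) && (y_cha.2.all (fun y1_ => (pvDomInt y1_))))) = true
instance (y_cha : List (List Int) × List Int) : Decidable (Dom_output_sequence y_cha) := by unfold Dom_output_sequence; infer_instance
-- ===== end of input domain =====

-- B fuses A's two passes (grouping by batch index, then mapping the first group) into one
-- early-stopping pass over the batch-0 prefix; objective: simpler, not faster.

-- ===== PORT A =====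
-- one loop iteration of A's first for-loop (state = (sequence, start), index i)
def osStepA (b : List (List Int)) (v : List Int) (st : List (List Int) × Int) (i : Nat) :
    List (List Int) × Int :=
  if (b.getD i []).getD 0 0 = st.2 then
    (st.1.modify st.2.toNat (fun g => g ++ [v.getD i 0]), st.2)
  else
    (st.1 ++ [[]], st.2 + 1)

-- one character of A's second loop; chr(idx+96) ported as Char.ofNat, exact for
-- codes in [0, 0x10FFFF] outside the surrogate range (Pre_ restricts to those)
def osCharA (idx : Int) : List String :=
  if idx = 0 then [" "]
  else if idx = 27 then ["'"]
  else if idx = 28 then []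
  else [String.singleton (Char.ofNat (idx + 96).toNat)]

def output_sequence (y_cha : List (List Int) × List Int) : String :=
  let st := (List.range y_cha.1.length).foldl (osStepA y_cha.1 y_cha.2) ([[]], (0 : Int))
  let index := st.1.getD 0 []
  let seq := index.foldl (fun acc idx => acc ++ osCharA idx) ([] : List String)
  PySem.Str.join "" seq

-- ===== PORT B =====
-- walk both lists together, stop at the first non-zero batch index, map each code to its string
def osAltGo : List (List Int) → List Int → List String
  | b :: bs, v :: vs =>
    if b.getD 0 0 ≠ 0 then []
    else if v = 0 then " " :: osAltGo bs vs
    else if v = 27 then "'" :: osAltGo bs vs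
    else if v = 28 then osAltGo bs vs
    else String.singleton (Char.ofNat (v + 96).toNat) :: osAltGo bs vs
  | _, _ => []

def output_sequence_alt (y_cha : List (List Int) × List Int) : String :=
  PySem.Str.join "" (osAltGo y_cha.1 y_cha.2)

-- ===== PRECONDITION & SPEC =====
-- Pre_ excludes inputs where Python A raises: an empty inner list (IndexError on y_cha[0][i][0]),
-- a code list shorter than the batch list (IndexError on y_cha[1][i]; this slightly over-excludes:
-- A still returns when every index it happens to touch is in range, see cites), and prefix codes
-- idx with idx+96 outside chr's range (ValueError) or in the surrogate range (A returns a lone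
-- surrogate, which no Lean String can represent, see cites).
def Pre_output_sequence (y_cha : List (List Int) × List Int) : Prop :=
  (∀ b ∈ y_cha.1, b ≠ []) ∧
  y_cha.1.length ≤ y_cha.2.length ∧
  ∀ v ∈ y_cha.2.take (y_cha.1.takeWhile (fun g => g.getD 0 0 == 0)).length,
    0 ≤ v + 96 ∧ (v + 96 < 55296 ∨ (57344 ≤ v + 96 ∧ v + 96 < 1114112))

instance (y_cha : List (List Int) × List Int) : Decidable (Pre_output_sequence y_cha) := by
  unfold Pre_output_sequence; infer_instance

def pvWitness_output_sequence : (List (List Int) × List Int) := ([[0], [0], [1]], [8, 5, 3])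

def Spec_output_sequence (y_cha : List (List Int) × List Int) (out : String) : Prop := out = output_sequence_alt y_cha
instance (y_cha : List (List Int) × List Int) (out : String) : Decidable (Spec_output_sequence y_cha out) := by unfold Spec_output_sequence; infer_instance

-- ===== CLAIM (what is proved, stated in full; the proofs are below) =====
def Claim_equal_output_sequence : Prop := ∀ (y_cha : List (List Int) × List Int), Dom_output_sequence y_cha → Pre_output_sequence y_cha → Spec_output_sequence y_cha (output_sequence y_cha)

-- ===== LEMMAS AND PROOFS =====

-- A's second loop, fold form → list form
def osMapA : List Int → List String
  | [] => []
  | idx :: t => osCharA idx ++ osMapA t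

theorem osMapA_foldl (l : List Int) (acc : List String) :
    l.foldl (fun acc idx => acc ++ osCharA idx) acc = acc ++ osMapA l := by
  induction l generalizing acc with
  | nil => simp [osMapA]
  | cons h t ih => simp [osMapA, List.foldl_cons, ih, List.append_assoc]

theorem getD_zero_modify_succ (l : List (List Int)) (j : Nat) (f : List Int → List Int) :
    (l.modify (j + 1) f).getD 0 [] = l.getD 0 [] := by
  cases l <;> simp [List.modify]

theorem tw_getD_eq (p : List Int → Bool) (l : List (List Int)) (i : Nat)
    (h : i < (l.takeWhile p).length) : p (l.getD i []) = true := by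
  induction l generalizing i with
  | nil => simp at h
  | cons a t ih =>
    by_cases hp : p a
    · cases i with
      | zero => simpa using hp
      | succ j =>
        simp only [List.takeWhile_cons, hp, if_true, List.length_cons,
          Nat.add_lt_add_iff_right] at h
        simpa using ih j h
    · simp [List.takeWhile_cons, hp] at h

theorem tw_getD_false (p : List Int → Bool) (l : List (List Int))
    (h : (l.takeWhile p).length < l.length) :
    p (l.getD (l.takeWhile p).length []) = false := by
  induction l with
  | nil => simp at h
  | cons a t ih =>
    by_cases hp : p a
    · simp only [List.takeWhile_cons, hp, if_true, List.length_cons,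
        Nat.add_lt_add_iff_right] at h
      simpa [List.takeWhile_cons, hp] using ih h
    · simpa [List.takeWhile_cons, hp] using hp

theorem take_succ_getD (v : List Int) (i : Nat) (h : i < v.length) :
    v.take (i + 1) = v.take i ++ [v.getD i 0] := by
  rw [List.take_succ, List.getElem?_eq_getElem h]
  simp [List.getD, List.getElem?_eq_getElem h]

-- the invariant of A's first loop: first group = the code prefix, start = 0 exactly on the prefix
theorem osLoopA_inv (b : List (List Int)) (v : List Int) (hlen : b.length ≤ v.length) :
    ∀ i, i ≤ b.length →
      (((List.range i).foldl (osStepA b v) ([[]], 0)).1 ≠ [] ∧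
       0 ≤ ((List.range i).foldl (osStepA b v) ([[]], 0)).2 ∧
       ((List.range i).foldl (osStepA b v) ([[]], 0)).1.getD 0 []
          = v.take (min i (b.takeWhile (fun g => g.getD 0 0 == 0)).length) ∧
       (((List.range i).foldl (osStepA b v) ([[]], 0)).2 = 0 ↔
          i ≤ (b.takeWhile (fun g => g.getD 0 0 == 0)).length)) := by
  intro i
  induction i with
  | zero => intro _; simp
  | succ i ih =>
    intro h
    have hi : i < b.length := h
    have hiv : i < v.length := lt_of_lt_of_le hi hlen
    obtain ⟨hne, hpos, hget, hiff⟩ := ih (le_of_lt hi)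
    rw [List.range_succ, List.foldl_append, List.foldl_cons, List.foldl_nil]
    set st := (List.range i).foldl (osStepA b v) ([[]], (0 : Int)) with hst
    set k := (b.takeWhile (fun g => g.getD 0 0 == 0)).length with hk
    obtain ⟨hd, tl, h1⟩ : ∃ hd tl, st.1 = hd :: tl := by
      cases hh : st.1 with
      | nil => exact absurd hh hne
      | cons a t => exact ⟨a, t, rfl⟩
    rw [h1] at hget
    simp only [List.getD_cons_zero] at hget
    by_cases hik : i < k
    · -- still inside the zero prefix: condition matches, append to group 0
      have hz : st.2 = 0 := hiff.mpr (le_of_lt hik)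
      have hcond : (b.getD i []).getD 0 0 = st.2 := by
        have h2 := tw_getD_eq _ b i hik
        simp only [beq_iff_eq] at h2
        rw [hz]; exact h2
      rw [osStepA, if_pos hcond, hz, h1]
      refine ⟨by simp [List.modify], by norm_num, ?_, ?_⟩
      · simp only [Int.toNat_zero, List.modify]
        rw [hget, Nat.min_eq_left (le_of_lt hik), Nat.min_eq_left hik,
          take_succ_getD v i hiv]
        simp [List.modifyTailIdx.go, List.modifyHead, List.getD]
      · simp [hik]
    · by_cases hz : st.2 = 0
      · -- exactly at the end of the prefix: first mismatch, start becomes 1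
        have hik2 : i = k := le_antisymm (hiff.mp hz) (not_lt.mp hik)
        have hkb : k < b.length := hik2 ▸ hi
        have hcond : ¬ (b.getD i []).getD 0 0 = st.2 := by
          have h2 := tw_getD_false (fun g => g.getD 0 0 == 0) b hkb
          rw [hz, hik2]
          simpa using h2
        rw [osStepA, if_neg hcond, h1]
        refine ⟨by simp, by omega, ?_, ?_⟩
        · simp only [List.cons_append, List.getD_cons_zero]
          rw [hget]; congr 1; omega
        · show st.2 + 1 = 0 ↔ i + 1 ≤ k
          constructor <;> intro <;> omega
      · -- past the prefix: start ≥ 1, group 0 is frozen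
        have hmin : min (i + 1) k = min i k := by
          have : k ≤ i := not_lt.mp hik
          omega
        rw [osStepA]
        split_ifs with hcond
        · obtain ⟨j, hj⟩ : ∃ j, st.2.toNat = j + 1 := ⟨st.2.toNat - 1, by omega⟩
          refine ⟨?_, by simpa using hpos, ?_, ?_⟩
          · rw [h1, hj]; simp [List.modify]
          · show (st.1.modify st.2.toNat _).getD 0 [] = _
            rw [hj, getD_zero_modify_succ, h1]
            simp only [List.getD_cons_zero]
            rw [hget, hmin]
          · show st.2 = 0 ↔ i + 1 ≤ k
            constructor <;> intro <;> omega
        · refine ⟨by simp [h1], by omega, ?_, ?_⟩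
          · rw [h1]
            simp only [List.cons_append, List.getD_cons_zero]
            rw [hget, hmin]
          · show st.2 + 1 = 0 ↔ i + 1 ≤ k
            constructor <;> intro <;> omega

-- B's pass = mapping of the code prefix
theorem osAltGo_eq (b : List (List Int)) (v : List Int) (hlen : b.length ≤ v.length) :
    osAltGo b v = osMapA (v.take (b.takeWhile (fun g => g.getD 0 0 == 0)).length) := by
  induction b generalizing v with
  | nil => cases v <;> simp [osAltGo, osMapA]
  | cons g bs ih =>
    cases v with
    | nil => simp at hlen
    | cons w vs =>
      simp only [List.length_cons, Nat.add_le_add_iff_right] at hlen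
      by_cases hg : g.getD 0 0 = 0
      · have h1 : List.takeWhile (fun g => g.getD 0 0 == 0) (g :: bs)
            = g :: List.takeWhile (fun g => g.getD 0 0 == 0) bs := by
          simp [List.takeWhile_cons, List.getD, hg]
          simpa [List.getD] using hg
        rw [h1, List.length_cons, List.take_succ_cons, osAltGo,
          if_neg (by simpa [List.getD] using hg), osMapA, ih vs hlen]
        unfold osCharA
        split_ifs <;> simp
      · have hg' : ¬ g[0]?.getD 0 = 0 := by simpa [List.getD] using hg
        rw [osAltGo, if_pos (by simpa [List.getD] using hg)]
        simp [List.takeWhile_cons, hg', osMapA]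

theorem length_tw_le (b : List (List Int)) :
    (b.takeWhile (fun g => g.getD 0 0 == 0)).length ≤ b.length :=
  (List.takeWhile_sublist _).length_le

-- ===== VERDICT (by name: the statement is the Claim_ definition above) =====
theorem output_sequence_spec : Claim_equal_output_sequence := by
  intro y _hdom hpre
  obtain ⟨hne, hlen, _hchr⟩ := hpre
  unfold Spec_output_sequence output_sequence output_sequence_alt
  obtain ⟨_, _, hget, _⟩ := osLoopA_inv y.1 y.2 hlen y.1.length le_rfl
  rw [osAltGo_eq y.1 y.2 hlen]
  simp only []
  rw [osMapA_foldl, hget, Nat.min_eq_right (length_tw_le y.1)]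
  simp
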